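-- pv_equiv track=rewrite | github.com/smital12/log_processor | log_processor.py | get_header_and_test_lines
-- ===== SOURCE A (Python) =====
-- def striplist(l):
--     return [x.strip() for x in l]
--
-- def get_header_and_test_lines(inLines, testName, isADCTest=False,
--                               isHeaderEveryTime=False):
--     # array to store desired lines
--     lines = []
--     isHeaderLine = False
--
--     for line in inLines:
--         isTestLine = False
--
--         # check what type of line this is and if we're interested in it
--         if testName in line:
--             isTestLine = True
--         # find start of header section, we'll flag all lines in the header so
--         # they're copied over
--         elif not isHeaderLine and line.startswith("Datalog report"):
--             isHeaderLine = True
--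
--         # copy only desired lines, skip blank header lines
--         if (isTestLine or
--            (isHeaderLine and line.strip()) or
--            (isADCTest and "First 10" in line)):
--             lines.append(line)
--
--         # indicate we've reached the end of the header and don't need to keep
--         # copying lines unless they match the desired test name
--         if isHeaderLine and line.startswith("    Device#: "):
--             isHeaderLine = False
--
--     return striplist(lines)
-- ===== SOURCE B (Python) =====
-- def get_header_and_test_lines(inLines, testName, isADCTest=False,
--                               isHeaderEveryTime=False):
--     # Region-segmentation algorithm: instead of carrying a per-line flag,
--     # jump from header-region start to its closing "    Device#: " line,
--     # handle the whole region as one slice, and skip ahead past it.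
--     out = []
--     i, n = 0, len(inLines)
--     while i < n:
--         line = inLines[i]
--         if testName not in line and line.startswith("Datalog report"):
--             # header region: lines[i] through the first Device# line (or end)
--             j = i + 1
--             while j < n and not inLines[j].startswith("    Device#: "):
--                 j += 1
--             for s in inLines[i:j + 1]:
--                 if testName in s or s.strip() or (isADCTest and "First 10" in s):
--                     out.append(s.strip())
--             i = j + 1
--         else:
--             if testName in line or (isADCTest and "First 10" in line):
--                 out.append(line.strip())
--             i += 1
--     return out
-- ===== Notes on version B (the rewrite author's own statement) =====
-- stated objective: alternative
-- what changed: B replaces A's per-line header-flag state machine by region segmentation: an index-jumping loop that, on seeing a header-region start, scans ahead for the closing 'Device#:' line, filters that whole slice at once and resumes after it, stripping as it goes instead of in a final pass.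
import Mathlib
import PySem

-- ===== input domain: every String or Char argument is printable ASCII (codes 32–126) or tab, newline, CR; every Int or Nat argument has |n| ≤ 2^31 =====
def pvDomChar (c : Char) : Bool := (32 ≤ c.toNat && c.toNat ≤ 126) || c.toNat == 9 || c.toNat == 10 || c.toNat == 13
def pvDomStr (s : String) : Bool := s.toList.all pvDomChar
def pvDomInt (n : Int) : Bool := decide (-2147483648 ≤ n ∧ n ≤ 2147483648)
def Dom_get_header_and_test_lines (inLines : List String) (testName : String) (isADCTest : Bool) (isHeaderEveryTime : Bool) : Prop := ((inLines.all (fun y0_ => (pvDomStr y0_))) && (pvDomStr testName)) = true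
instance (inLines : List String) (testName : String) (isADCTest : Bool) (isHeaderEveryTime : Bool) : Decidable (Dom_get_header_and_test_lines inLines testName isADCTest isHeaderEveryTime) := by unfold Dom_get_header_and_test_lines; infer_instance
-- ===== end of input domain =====

-- B replaces A's per-line header-flag state machine by region segmentation: it jumps from each header-region start to its closing "Device#:" line and processes the whole region as one slice; alternative decomposition, same cost.


-- ===== PORT A =====
def striplist (l : List String) : List String := l.map PySem.Str.strip

-- one iteration of A's for-loop: state = (lines accumulator, isHeaderLine)
def aStep (testName : String) (isADCTest : Bool) (st : List String × Bool) (line : String) : List String × Bool :=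
  let acc := st.1
  let isHeaderLine := st.2
  -- if testName in line: isTestLine = True / elif not isHeaderLine and line.startswith("Datalog report"): isHeaderLine = True
  let p : Bool × Bool :=
    if PySem.Str.isIn testName line then (true, isHeaderLine)
    else if !isHeaderLine && PySem.Str.startswith line "Datalog report" then (false, true)
    else (false, isHeaderLine)
  let isTestLine := p.1
  let isHeaderLine := p.2
  let acc :=
    if isTestLine || (isHeaderLine && !(PySem.Str.strip line).toList.isEmpty)
       || (isADCTest && PySem.Str.isIn "First 10" line)
    then acc ++ [line] else acc
  let isHeaderLine :=
    if isHeaderLine && PySem.Str.startswith line "    Device#: " then false else isHeaderLine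
  (acc, isHeaderLine)

def get_header_and_test_lines (inLines : List String) (testName : String) (isADCTest : Bool) (isHeaderEveryTime : Bool) : List String :=
  striplist (inLines.foldl (aStep testName isADCTest) ([], false)).1

-- ===== PORT B =====
-- inner while loop: first index j' ≥ j (j' < n) whose line starts the region close; n if none
def findClose (inLines : List String) (n j : Nat) : Nat :=
  if _h : j < n then
    if PySem.Str.startswith (inLines.getD j "") "    Device#: " then j
    else findClose inLines n (j + 1)
  else j
termination_by n - j

-- findClose never goes backwards (the outer loop's index strictly advances)
theorem le_findClose (inLines : List String) (n j : Nat) : j ≤ findClose inLines n j := by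
  unfold findClose
  split
  · split
    · exact le_refl _
    · exact le_trans (Nat.le_succ j) (le_findClose inLines n (j + 1))
  · exact le_refl _
termination_by n - j

-- outer while loop of B
def bLoop (inLines : List String) (testName : String) (isADCTest : Bool) (n i : Nat) (acc : List String) : List String :=
  if h : i < n then
    let line := inLines.getD i ""
    if !PySem.Str.isIn testName line && PySem.Str.startswith line "Datalog report" then
      let j := findClose inLines n (i + 1)
      let acc := (PySem.List.slice inLines (some (i : Int)) (some ((j : Int) + 1))).foldl
        (fun a s => if PySem.Str.isIn testName s || !(PySem.Str.strip s).toList.isEmpty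
                        || (isADCTest && PySem.Str.isIn "First 10" s)
                    then a ++ [PySem.Str.strip s] else a) acc
      bLoop inLines testName isADCTest n (j + 1) acc
    else
      let acc := if PySem.Str.isIn testName line || (isADCTest && PySem.Str.isIn "First 10" line)
                 then acc ++ [PySem.Str.strip line] else acc
      bLoop inLines testName isADCTest n (i + 1) acc
  else acc
termination_by n - i
decreasing_by
  · have := le_findClose inLines n (i + 1); omega
  · omega

def get_header_and_test_lines_alt (inLines : List String) (testName : String) (isADCTest : Bool) (isHeaderEveryTime : Bool) : List String :=
  bLoop inLines testName isADCTest inLines.length 0 []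

-- ===== PRECONDITION & SPEC =====
def Spec_get_header_and_test_lines (inLines : List String) (testName : String) (isADCTest : Bool) (isHeaderEveryTime : Bool) (out : List String) : Prop := out = get_header_and_test_lines_alt inLines testName isADCTest isHeaderEveryTime
instance (inLines : List String) (testName : String) (isADCTest : Bool) (isHeaderEveryTime : Bool) (out : List String) : Decidable (Spec_get_header_and_test_lines inLines testName isADCTest isHeaderEveryTime out) := by unfold Spec_get_header_and_test_lines; infer_instance

-- ===== CLAIM (what is proved, stated in full; the proofs are below) =====
def Claim_equal_get_header_and_test_lines : Prop := ∀ (inLines : List String) (testName : String) (isADCTest : Bool) (isHeaderEveryTime : Bool), Dom_get_header_and_test_lines inLines testName isADCTest isHeaderEveryTime → Spec_get_header_and_test_lines inLines testName isADCTest isHeaderEveryTime (get_header_and_test_lines inLines testName isADCTest isHeaderEveryTime)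

-- ===== LEMMAS AND PROOFS =====

-- keep predicate inside an open header region / outside any region
def keepH (testName : String) (isADCTest : Bool) (s : String) : Bool :=
  PySem.Str.isIn testName s || !(PySem.Str.strip s).toList.isEmpty
    || (isADCTest && PySem.Str.isIn "First 10" s)

def keepP (testName : String) (isADCTest : Bool) (s : String) : Bool :=
  PySem.Str.isIn testName s || (isADCTest && PySem.Str.isIn "First 10" s)

def isClose (s : String) : Bool := PySem.Str.startswith s "    Device#: "

def isStart (testName : String) (s : String) : Bool :=
  !PySem.Str.isIn testName s && PySem.Str.startswith s "Datalog report"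

-- A's fold result (accumulator dropped)
def F (testName : String) (isADCTest : Bool) (ls : List String) (h : Bool) : List String :=
  (ls.foldl (aStep testName isADCTest) ([], h)).1

theorem aStep_acc (testName : String) (isADCTest : Bool) (acc : List String) (h : Bool) (line : String) :
    aStep testName isADCTest (acc, h) line
      = (acc ++ (aStep testName isADCTest ([], h) line).1, (aStep testName isADCTest ([], h) line).2) := by
  simp only [aStep]
  split_ifs <;> simp_all

theorem F_acc (testName : String) (isADCTest : Bool) (ls : List String) (acc : List String) (h : Bool) :
    (ls.foldl (aStep testName isADCTest) (acc, h)).1 = acc ++ F testName isADCTest ls h := by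
  induction ls generalizing acc h with
  | nil => simp [F]
  | cons line rest ih =>
    simp only [F, List.foldl_cons]
    rw [aStep_acc, ih, aStep_acc testName isADCTest [], ih]
    simp

-- a region-start line cannot simultaneously be a close line
theorem start_not_close (l : List Char)
    (h : PySem.Chars.startswith l ['D','a','t','a','l','o','g',' ','r','e','p','o','r','t'] = true) :
    PySem.Chars.startswith l [' ',' ',' ',' ','D','e','v','i','c','e','#',':',' '] = false := by
  rcases (PySem.Chars.startswith_iff _ _).1 h with ⟨t1, e1⟩
  rw [Bool.eq_false_iff]
  intro h2
  rcases (PySem.Chars.startswith_iff _ _).1 h2 with ⟨t2, e2⟩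
  rw [← e1] at e2
  simp at e2

-- unfolding F on a cons in the CLOSED state
theorem F_closed_cons (testName : String) (isADCTest : Bool) (line : String) (rest : List String) :
    F testName isADCTest (line :: rest) false
      = if isStart testName line then
          (if keepH testName isADCTest line then [line] else [])
            ++ F testName isADCTest rest true
        else
          (if keepP testName isADCTest line then [line] else [])
            ++ F testName isADCTest rest false := by
  simp only [F, List.foldl_cons, aStep, isStart, keepH, keepP]
  split_ifs <;> simp_all [F_acc, start_not_close]

-- unfolding F on a cons in the OPEN state
theorem F_open_cons (testName : String) (isADCTest : Bool) (line : String) (rest : List String) :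
    F testName isADCTest (line :: rest) true
      = (if keepH testName isADCTest line then [line] else [])
          ++ F testName isADCTest rest (!isClose line) := by
  simp only [F, List.foldl_cons, aStep, keepH, isClose]
  split_ifs <;> simp_all [F_acc]

-- in the open state A copies exactly the region up to and including the first close line
theorem F_open (testName : String) (isADCTest : Bool) (ls : List String) :
    F testName isADCTest ls true
      = (ls.take (ls.findIdx isClose + 1)).filter (keepH testName isADCTest)
          ++ F testName isADCTest (ls.drop (ls.findIdx isClose + 1)) false := by
  induction ls with
  | nil => simp [F]
  | cons line rest ih =>
    rw [F_open_cons]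
    by_cases hc : isClose line
    · simp only [List.findIdx_cons, hc, cond_true, Bool.not_true, List.take_succ_cons,
        List.take_zero, List.drop_succ_cons, List.drop_zero, List.filter_cons]
      split <;> simp [F]
    · simp only [List.findIdx_cons, hc, cond_false, Bool.not_false, List.take_succ_cons,
        List.drop_succ_cons, List.filter_cons, ih]
      split <;> simp

-- findClose is the absolute index of the first close line at or after j
theorem findClose_eq (inLines : List String) (j : Nat) (hj : j ≤ inLines.length) :
    findClose inLines inLines.length j = j + (inLines.drop j).findIdx isClose := by
  rw [findClose]
  rcases Nat.lt_or_ge j inLines.length with h | h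
  · have hd : inLines.drop j = inLines[j] :: inLines.drop (j + 1) := List.drop_eq_getElem_cons h
    have hg : inLines.getD j "" = inLines[j] := by
      simp [List.getD_eq_getElem?_getD, List.getElem?_eq_getElem h]
    rw [dif_pos h, hg]
    split
    · next hc =>
      have hx : isClose inLines[j] = true := hc
      have h0 : (List.drop j inLines).findIdx isClose = 0 := by
        rw [hd, List.findIdx_cons, hx]; rfl
      omega
    · next hc =>
      rw [findClose_eq inLines (j + 1) h]
      have hx : isClose inLines[j] = false := by simpa [isClose] using hc
      have h0 : (List.drop j inLines).findIdx isClose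
          = (List.drop (j + 1) inLines).findIdx isClose + 1 := by
        rw [hd, List.findIdx_cons, hx]; rfl
      omega
  · have hj' : j = inLines.length := le_antisymm hj h
    rw [dif_neg (by omega)]
    simp [hj']
termination_by inLines.length - j

-- main invariant: B's outer loop from index i computes A's remaining fold (closed state), stripped
theorem bLoop_eq (inLines : List String) (testName : String) (isADCTest : Bool) (i : Nat) (acc : List String) :
    bLoop inLines testName isADCTest inLines.length i acc
      = acc ++ (F testName isADCTest (inLines.drop i) false).map PySem.Str.strip := by
  rw [bLoop]
  rcases Nat.lt_or_ge i inLines.length with h | h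
  · have hd : inLines.drop i = inLines[i] :: inLines.drop (i + 1) := List.drop_eq_getElem_cons h
    have hg : inLines.getD i "" = inLines[i] := by
      simp [List.getD_eq_getElem?_getD, List.getElem?_eq_getElem h]
    simp only [dif_pos h, hg]
    split
    · next hs =>
      have hfc : findClose inLines inLines.length (i + 1)
          = (i + 1) + (inLines.drop (i + 1)).findIdx isClose := findClose_eq inLines (i + 1) h
      set k := (inLines.drop (i + 1)).findIdx isClose with hk
      rw [hfc, bLoop_eq inLines testName isADCTest (i + 1 + k + 1)]
      have hslice : PySem.List.slice inLines (some ((i : Nat) : Int)) (some (((i + 1 + k : Nat) : Int) + 1))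
          = inLines[i] :: (inLines.drop (i + 1)).take (k + 1) := by
        have e1 : ((i + 1 + k : Nat) : Int) + 1 = ((i + k + 2 : Nat) : Int) := by push_cast; ring
        rw [e1, PySem.List.slice_natCast, hd]
        have e2 : i + k + 2 - i = k + 2 := by omega
        rw [e2, List.take_succ_cons]
      rw [hslice, PySem.List.foldl_append_if]
      rw [show (fun s => PySem.Str.isIn testName s || !(PySem.Str.strip s).toList.isEmpty
            || (isADCTest && PySem.Str.isIn "First 10" s)) = keepH testName isADCTest from rfl]
      rw [hd, F_closed_cons]
      rw [if_pos (show isStart testName inLines[i] = true from hs), F_open, ← hk]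
      have e3 : (inLines.drop (i + 1)).drop (k + 1) = inLines.drop (i + 1 + k + 1) := by
        rw [List.drop_drop, show i + 1 + (k + 1) = i + 1 + k + 1 from by omega]
      rw [e3]
      simp only [List.filter_cons, List.map_append, List.append_assoc]
      split <;> simp
    · next hs =>
      rw [bLoop_eq inLines testName isADCTest (i + 1)]
      rw [hd, F_closed_cons]
      rw [if_neg (show ¬ isStart testName inLines[i] = true from hs)]
      rw [show (PySem.Str.isIn testName inLines[i] || (isADCTest && PySem.Str.isIn "First 10" inLines[i]))
            = keepP testName isADCTest inLines[i] from rfl]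
      split <;> simp
  · rw [dif_neg (by omega)]
    rw [List.drop_eq_nil_of_le h]
    simp [F]
termination_by inLines.length - i
decreasing_by
  · omega
  · omega

-- ===== VERDICT (by name: the statement is the Claim_ definition above) =====
theorem get_header_and_test_lines_spec : Claim_equal_get_header_and_test_lines := by
  intro inLines testName isADCTest isHeaderEveryTime _
  unfold Spec_get_header_and_test_lines get_header_and_test_lines get_header_and_test_lines_alt striplist
  rw [bLoop_eq]
  simp [F]
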